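-- pv_equiv track=rewrite | github.com/hamcoding9/DailyPractice | Programmers/[DAY24]체육복.py | solution
-- ===== SOURCE A (Python) =====
-- def solution(n, lost, reserve):
--     have_uniform = set(lost) & set(reserve)
--     lost_uniform = set(lost) - have_uniform
--     reserve_uniform = set(reserve) - have_uniform
--     for i in sorted(reserve_uniform):
--         if i - 1 in lost_uniform:
--             lost_uniform.remove(i - 1)
--         elif i + 1 in lost_uniform:
--             lost_uniform.remove(i + 1)
--     return n - len(lost_uniform)
-- ===== SOURCE B (Python) =====
-- def solution(n, lost, reserve):
--     have_uniform = set(lost) & set(reserve)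
--     L = sorted(set(lost) - have_uniform)
--     R = sorted(set(reserve) - have_uniform)
--     uncovered = 0
--     i = j = 0
--     while i < len(L) and j < len(R):
--         l, r = L[i], R[j]
--         if r < l:
--             if r + 1 == l:
--                 i += 1
--                 j += 1
--             else:
--                 j += 1
--         elif l + 1 == r:
--             i += 1
--             j += 1
--         else:
--             uncovered += 1
--             i += 1
--     uncovered += len(L) - i
--     return n - uncovered
-- ===== Notes on version B (the rewrite author's own statement) =====
-- stated objective: alternative
-- what changed: A drives the greedy from the sorted reserve set while destructively shrinking the lost-set; B instead sorts both uniform sets once and runs a two-pointer merge over the two sorted lists, counting uncovered lost students with no mutable set during matching.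
import Mathlib
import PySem

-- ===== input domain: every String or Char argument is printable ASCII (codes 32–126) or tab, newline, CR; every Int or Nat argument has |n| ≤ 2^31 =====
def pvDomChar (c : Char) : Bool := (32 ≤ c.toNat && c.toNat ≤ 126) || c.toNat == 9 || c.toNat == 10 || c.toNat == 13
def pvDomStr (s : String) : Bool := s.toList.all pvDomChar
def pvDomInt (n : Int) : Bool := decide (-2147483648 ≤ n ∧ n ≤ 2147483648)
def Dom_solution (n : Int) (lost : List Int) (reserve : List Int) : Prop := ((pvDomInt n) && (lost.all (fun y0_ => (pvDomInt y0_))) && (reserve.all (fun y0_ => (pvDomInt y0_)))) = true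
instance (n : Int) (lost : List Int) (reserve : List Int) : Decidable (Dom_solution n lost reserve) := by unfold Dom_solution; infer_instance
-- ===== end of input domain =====

-- B replaces A's reserve-driven loop that mutates the lost-set with a two-pointer merge
-- of the two sorted uniform lists (objective: alternative decomposition, same result).

-- ===== PORT A =====
-- one iteration of A's for-loop body ('lost_uniform.remove' is guarded by the membership
-- test, so it cannot raise; PySem.Set.discard is exact there)
def pyStepA (s : PySem.Set Int) (i : Int) : PySem.Set Int :=
  if PySem.Set.contains s (i - 1) then PySem.Set.discard s (i - 1)
  else if PySem.Set.contains s (i + 1) then PySem.Set.discard s (i + 1)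
  else s

def solution (n : Int) (lost : List Int) (reserve : List Int) : Int :=
  let haveUniform := PySem.Set.inter (PySem.Set.ofList lost) (PySem.Set.ofList reserve)
  let lostUniform := PySem.Set.diff (PySem.Set.ofList lost) haveUniform
  let reserveUniform := PySem.Set.diff (PySem.Set.ofList reserve) haveUniform
  let finalLost := (PySem.List.sorted reserveUniform (fun x => x)).foldl pyStepA lostUniform
  n - PySem.Set.len finalLost

-- ===== PORT B =====
-- the two-pointer while-loop of Source B as structural recursion over the two sorted lists;
-- it returns the number of lost students left uncovered
def uncov : List Int → List Int → Int
  | L, [] => (L.length : Int)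
  | [], _ :: _ => 0
  | l :: L, r :: R =>
      if r < l then
        (if r + 1 = l then uncov L R else uncov (l :: L) R)
      else if l + 1 = r then uncov L R
      else uncov L (r :: R) + 1
termination_by L R => L.length + R.length

def solution_alt (n : Int) (lost : List Int) (reserve : List Int) : Int :=
  let haveUniform := PySem.Set.inter (PySem.Set.ofList lost) (PySem.Set.ofList reserve)
  let sortedLost := PySem.List.sorted (PySem.Set.diff (PySem.Set.ofList lost) haveUniform) (fun x => x)
  let sortedReserve := PySem.List.sorted (PySem.Set.diff (PySem.Set.ofList reserve) haveUniform) (fun x => x)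
  n - uncov sortedLost sortedReserve

-- ===== PRECONDITION & SPEC =====
def Spec_solution (n : Int) (lost : List Int) (reserve : List Int) (out : Int) : Prop := out = solution_alt n lost reserve
instance (n : Int) (lost : List Int) (reserve : List Int) (out : Int) : Decidable (Spec_solution n lost reserve out) := by unfold Spec_solution; infer_instance

-- ===== CLAIM (what is proved, stated in full; the proofs are below) =====
def Claim_equal_solution : Prop := ∀ (n : Int) (lost : List Int) (reserve : List Int), Dom_solution n lost reserve → Spec_solution n lost reserve (solution n lost reserve)

-- ===== LEMMAS AND PROOFS =====

lemma pyStepA_eq (S : PySem.Set Int) (i : Int) :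
    pyStepA S i = if (i - 1) ∈ S then PySem.Set.discard S (i - 1)
      else if (i + 1) ∈ S then PySem.Set.discard S (i + 1) else S := by
  simp [pyStepA]

lemma discard_eq_filter (S : PySem.Set Int) (x : Int) :
    PySem.Set.discard S x = S.filter (fun y => !(y == x)) := rfl

lemma mem_discard' {S : PySem.Set Int} {y x : Int} :
    y ∈ PySem.Set.discard S x ↔ y ∈ S ∧ y ≠ x := by
  rw [discard_eq_filter]; simp

lemma discard_comm (S : PySem.Set Int) (a b : Int) :
    PySem.Set.discard (PySem.Set.discard S a) b
      = PySem.Set.discard (PySem.Set.discard S b) a := by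
  simp only [discard_eq_filter, List.filter_filter]
  congr 1
  funext y
  rw [Bool.and_comm]

lemma nodup_discard' {S : PySem.Set Int} (x : Int) (h : S.Nodup) :
    (PySem.Set.discard S x).Nodup := by
  rw [discard_eq_filter]; exact h.filter _

lemma filter_ne_self (S : List Int) (x : Int) (hx : x ∉ S) :
    List.filter (fun y => !(y == x)) S = S :=
  List.filter_eq_self.mpr (fun b hb => by
    have hbx : b ≠ x := fun hh => hx (hh ▸ hb)
    simp [hbx])

lemma discard_cons_self (S : List Int) (x : Int) (hx : x ∉ S) :
    PySem.Set.discard (x :: S) x = S := by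
  rw [discard_eq_filter]
  have h1 : List.filter (fun y => !(y == x)) (x :: S) = List.filter (fun y => !(y == x)) S := by
    simp
  rw [h1]
  exact filter_ne_self S x hx

lemma discard_cons_ne (S : List Int) (a x : Int) (hax : a ≠ x) :
    PySem.Set.discard (a :: S) x = a :: PySem.Set.discard S x := by
  rw [discard_eq_filter, discard_eq_filter]
  simp [hax]

lemma length_discard_add_one {S : PySem.Set Int} {x : Int} (hn : S.Nodup) (hx : x ∈ S) :
    (PySem.Set.discard S x).length + 1 = S.length := by
  induction S with
  | nil => cases hx
  | cons a S ih =>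
    by_cases hax : a = x
    · subst hax
      have hnotin : a ∉ S := (List.nodup_cons.mp hn).1
      rw [discard_cons_self S a hnotin]
      simp
    · have hx' : x ∈ S := by
        rcases List.mem_cons.mp hx with h | h
        · exact absurd h (fun hh => hax hh.symm)
        · exact h
      rw [discard_cons_ne S a x hax, List.length_cons, List.length_cons]
      have := ih (List.nodup_cons.mp hn).2 hx'
      omega

lemma pyStepA_nil (i : Int) : pyStepA [] i = [] := by
  rw [pyStepA_eq]; simp

lemma foldl_pyStepA_nil (R : List Int) : R.foldl pyStepA [] = [] := by
  induction R with
  | nil => rfl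
  | cons r R ih => simp only [List.foldl_cons, pyStepA_nil]; exact ih

lemma nodup_pyStepA {S : PySem.Set Int} (i : Int) (h : S.Nodup) : (pyStepA S i).Nodup := by
  rw [pyStepA_eq]
  split_ifs
  · exact nodup_discard' _ h
  · exact nodup_discard' _ h
  · exact h

lemma nodup_foldl_pyStepA (R : List Int) : ∀ (S : PySem.Set Int), S.Nodup → (R.foldl pyStepA S).Nodup := by
  induction R with
  | nil => intro S h; exact h
  | cons r R ih => intro S h; exact ih _ (nodup_pyStepA r h)

lemma mem_pyStepA {S : PySem.Set Int} {x : Int} (i : Int) (hx : x ∈ S)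
    (h1 : i - 1 ≠ x) (h2 : i + 1 ≠ x) : x ∈ pyStepA S i := by
  rw [pyStepA_eq]
  split_ifs
  · exact mem_discard'.mpr ⟨hx, fun hh => h1 hh.symm⟩
  · exact mem_discard'.mpr ⟨hx, fun hh => h2 hh.symm⟩
  · exact hx

lemma mem_foldl_pyStepA (R : List Int) : ∀ (S : PySem.Set Int) (x : Int), x ∈ S →
    (∀ i ∈ R, x + 1 < i) → x ∈ R.foldl pyStepA S := by
  induction R with
  | nil => intro S x hx _; exact hx
  | cons r R ih =>
    intro S x hx h
    have hr := h r (List.mem_cons_self ..)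
    refine ih _ x (mem_pyStepA r hx (by omega) (by omega)) (fun i hi => h i (List.mem_cons_of_mem _ hi))

lemma pyStepA_discard (S : PySem.Set Int) (x i : Int) (h : x + 1 < i) :
    pyStepA (PySem.Set.discard S x) i = PySem.Set.discard (pyStepA S i) x := by
  have m1 : (i - 1) ∈ PySem.Set.discard S x ↔ (i - 1) ∈ S := by
    rw [mem_discard']; constructor
    · exact fun hh => hh.1
    · exact fun hh => ⟨hh, by omega⟩
  have m2 : (i + 1) ∈ PySem.Set.discard S x ↔ (i + 1) ∈ S := by
    rw [mem_discard']; constructor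
    · exact fun hh => hh.1
    · exact fun hh => ⟨hh, by omega⟩
  rw [pyStepA_eq, pyStepA_eq]
  by_cases hm1 : (i - 1) ∈ S
  · rw [if_pos (m1.mpr hm1), if_pos hm1, discard_comm]
  · rw [if_neg (fun hh => hm1 (m1.mp hh)), if_neg hm1]
    by_cases hm2 : (i + 1) ∈ S
    · rw [if_pos (m2.mpr hm2), if_pos hm2, discard_comm]
    · rw [if_neg (fun hh => hm2 (m2.mp hh)), if_neg hm2]

lemma foldl_pyStepA_discard (R : List Int) : ∀ (S : PySem.Set Int) (x : Int),
    (∀ i ∈ R, x + 1 < i) →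
    R.foldl pyStepA (PySem.Set.discard S x) = PySem.Set.discard (R.foldl pyStepA S) x := by
  induction R with
  | nil => intro S x _; rfl
  | cons r R ih =>
    intro S x h
    simp only [List.foldl_cons]
    rw [pyStepA_discard S x r (h r (List.mem_cons_self ..))]
    exact ih _ x (fun i hi => h i (List.mem_cons_of_mem _ hi))

lemma pyStepA_perm {S S' : PySem.Set Int} (h : S.Perm S') (i : Int) :
    (pyStepA S i).Perm (pyStepA S' i) := by
  have e1 : ((i - 1) ∈ S') = ((i - 1) ∈ S) := (propext h.mem_iff).symm
  have e2 : ((i + 1) ∈ S') = ((i + 1) ∈ S) := (propext h.mem_iff).symm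
  rw [pyStepA_eq, pyStepA_eq]
  simp only [e1, e2]
  split_ifs with h1 h2
  · exact h.filter _
  · exact h.filter _
  · exact h

lemma foldl_pyStepA_perm (R : List Int) : ∀ {S S' : PySem.Set Int}, S.Perm S' →
    (R.foldl pyStepA S).Perm (R.foldl pyStepA S') := by
  induction R with
  | nil => intro S S' h; exact h
  | cons r R ih => intro S S' h; exact ih (pyStepA_perm h r)

lemma pairwise_lt_sorted (xs : List Int) (h : xs.Nodup) :
    (PySem.List.sorted xs (fun x => x)).Pairwise (· < ·) := by
  have hle := PySem.List.sorted_pairwise xs (fun x => x)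
  have hperm := PySem.List.sorted_perm xs (fun x => x) false
  have hnd : (PySem.List.sorted xs (fun x => x)).Nodup := hperm.nodup_iff.mpr h
  exact (hle.and hnd).imp (fun hab => lt_of_le_of_ne hab.1 hab.2)

lemma uncov_cons (l : Int) (L : List Int) (r : Int) (R : List Int) :
    uncov (l :: L) (r :: R) = if r < l then
        (if r + 1 = l then uncov L R else uncov (l :: L) R)
      else if l + 1 = r then uncov L R
      else uncov L (r :: R) + 1 := by
  rw [uncov.eq_def]

lemma uncov_nilR (L : List Int) : uncov L [] = (L.length : Int) := by
  cases L <;> rw [uncov.eq_def]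

lemma uncov_nilL (r : Int) (R : List Int) : uncov [] (r :: R) = 0 := by
  rw [uncov.eq_def]

-- the heart of the equivalence: A's reserve-driven fold over any strictly ascending
-- disjoint pair of lists leaves exactly 'uncov L R' lost students uncovered
lemma fold_eq_uncov : ∀ (k : Nat) (L R : List Int), L.length + R.length ≤ k →
    L.Pairwise (· < ·) → R.Pairwise (· < ·) → (∀ x ∈ L, x ∉ R) →
    ((R.foldl pyStepA L).length : Int) = uncov L R := by
  intro k
  induction k with
  | zero =>
    intro L R hk _ _ _
    cases L with
    | nil =>
      cases R with
      | nil => simp [uncov_nilR]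
      | cons r R => simp at hk
    | cons l L => simp at hk
  | succ k ih =>
    intro L R hk hL hR hD
    cases R with
    | nil => simp [uncov_nilR]
    | cons r R =>
      cases L with
      | nil =>
        rw [foldl_pyStepA_nil, uncov_nilL]
        simp
      | cons l L =>
        have hLmin : ∀ y ∈ L, l < y := (List.pairwise_cons.mp hL).1
        have hRmin : ∀ y ∈ R, r < y := (List.pairwise_cons.mp hR).1
        have hLt : L.Pairwise (· < ·) := (List.pairwise_cons.mp hL).2
        have hRt : R.Pairwise (· < ·) := (List.pairwise_cons.mp hR).2
        have hlr : l ≠ r := fun hh => hD l (List.mem_cons_self ..) (hh ▸ List.mem_cons_self ..)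
        have hDlt : ∀ x ∈ L, x ∉ r :: R := fun x hx => hD x (List.mem_cons_of_mem _ hx)
        have hDt : ∀ x ∈ L, x ∉ R := fun x hx hxr => hDlt x hx (List.mem_cons_of_mem _ hxr)
        have hDct : ∀ x ∈ l :: L, x ∉ R := fun x hx hxr => hD x hx (List.mem_cons_of_mem _ hxr)
        have hlnotinL : l ∉ L := fun hh => absurd (hLmin l hh) (lt_irrefl l)
        have hdiscard_head : PySem.Set.discard (l :: L) l = L := discard_cons_self L l hlnotinL
        have hk' : L.length + R.length ≤ k := by
          simp only [List.length_cons] at hk; omega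
        have hk'L : (l :: L).length + R.length ≤ k := by
          simp only [List.length_cons] at hk ⊢; omega
        have hk'R : L.length + (r :: R).length ≤ k := by
          simp only [List.length_cons] at hk ⊢; omega
        by_cases hc1 : r < l
        · -- reserve head below lost head
          have hn1 : (r - 1) ∉ l :: L := by
            intro hm
            rcases List.mem_cons.mp hm with hh | hh
            · omega
            · exact absurd (hLmin _ hh) (by omega)
          by_cases hc2 : r + 1 = l
          · have hstep : pyStepA (l :: L) r = L := by
              rw [pyStepA_eq, if_neg hn1,
                if_pos (by rw [hc2]; exact List.mem_cons_self ..), hc2, hdiscard_head]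
            simp only [List.foldl_cons, hstep]
            rw [ih L R hk' hLt hRt hDt, uncov_cons, if_pos hc1, if_pos hc2]
          · have hn2 : (r + 1) ∉ l :: L := by
              intro hm
              rcases List.mem_cons.mp hm with hh | hh
              · exact hc2 hh
              · exact absurd (hLmin _ hh) (by omega)
            have hstep : pyStepA (l :: L) r = l :: L := by
              rw [pyStepA_eq, if_neg hn1, if_neg hn2]
            simp only [List.foldl_cons, hstep]
            rw [ih (l :: L) R hk'L hL hRt hDct, uncov_cons, if_pos hc1, if_neg hc2]
        · -- lost head below reserve head
          have hlt : l < r := lt_of_le_of_ne (not_lt.mp hc1) hlr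
          by_cases hc2 : l + 1 = r
          · have hr1 : r - 1 = l := by omega
            have hstep : pyStepA (l :: L) r = L := by
              rw [pyStepA_eq, if_pos (by rw [hr1]; exact List.mem_cons_self ..), hr1,
                hdiscard_head]
            simp only [List.foldl_cons, hstep]
            rw [ih L R hk' hLt hRt hDt, uncov_cons, if_neg hc1, if_pos hc2]
          · -- l is never touched by the fold: peel it off
            have hkey : ∀ i ∈ r :: R, l + 1 < i := by
              intro i hi
              rcases List.mem_cons.mp hi with hh | hh
              · omega
              · have := hRmin i hh; omega
            have hcomm := foldl_pyStepA_discard (r :: R) (l :: L) l hkey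
            rw [hdiscard_head] at hcomm
            have hmem : l ∈ (r :: R).foldl pyStepA (l :: L) :=
              mem_foldl_pyStepA (r :: R) (l :: L) l (List.mem_cons_self ..) hkey
            have hnd : ((r :: R).foldl pyStepA (l :: L)).Nodup :=
              nodup_foldl_pyStepA (r :: R) (l :: L) (hL.imp (fun hab => ne_of_lt hab))
            have hlen1 := length_discard_add_one hnd hmem
            rw [← hcomm] at hlen1
            have hrec := ih L (r :: R) hk'R hLt hR hDlt
            rw [uncov_cons, if_neg hc1, if_neg hc2]
            omega

-- the two ports compute the same answer for the actual (unsorted) uniform sets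
lemma bridge (lost reserve : List Int) :
    PySem.Set.len ((PySem.List.sorted (PySem.Set.diff (PySem.Set.ofList reserve) (PySem.Set.inter (PySem.Set.ofList lost) (PySem.Set.ofList reserve))) (fun x => x)).foldl pyStepA (PySem.Set.diff (PySem.Set.ofList lost) (PySem.Set.inter (PySem.Set.ofList lost) (PySem.Set.ofList reserve))))
      = uncov (PySem.List.sorted (PySem.Set.diff (PySem.Set.ofList lost) (PySem.Set.inter (PySem.Set.ofList lost) (PySem.Set.ofList reserve))) (fun x => x))
          (PySem.List.sorted (PySem.Set.diff (PySem.Set.ofList reserve) (PySem.Set.inter (PySem.Set.ofList lost) (PySem.Set.ofList reserve))) (fun x => x)) := by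
  have hlostU := PySem.Set.nodup_diff (PySem.Set.ofList lost) (PySem.Set.inter (PySem.Set.ofList lost) (PySem.Set.ofList reserve)) (PySem.Set.nodup_ofList lost)
  have hresU := PySem.Set.nodup_diff (PySem.Set.ofList reserve) (PySem.Set.inter (PySem.Set.ofList lost) (PySem.Set.ofList reserve)) (PySem.Set.nodup_ofList reserve)
  have hpermL := PySem.List.sorted_perm (PySem.Set.diff (PySem.Set.ofList lost) (PySem.Set.inter (PySem.Set.ofList lost) (PySem.Set.ofList reserve))) (fun x => x) false
  have hpermR := PySem.List.sorted_perm (PySem.Set.diff (PySem.Set.ofList reserve) (PySem.Set.inter (PySem.Set.ofList lost) (PySem.Set.ofList reserve))) (fun x => x) false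
  have hfold := foldl_pyStepA_perm (PySem.List.sorted (PySem.Set.diff (PySem.Set.ofList reserve) (PySem.Set.inter (PySem.Set.ofList lost) (PySem.Set.ofList reserve))) (fun x => x)) hpermL.symm
  have hdisj : ∀ x ∈ PySem.List.sorted (PySem.Set.diff (PySem.Set.ofList lost) (PySem.Set.inter (PySem.Set.ofList lost) (PySem.Set.ofList reserve))) (fun x => x),
      x ∉ PySem.List.sorted (PySem.Set.diff (PySem.Set.ofList reserve) (PySem.Set.inter (PySem.Set.ofList lost) (PySem.Set.ofList reserve))) (fun x => x) := by
    intro x hxL hxR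
    have hxL' := (PySem.Set.mem_diff _ _ _).mp (hpermL.mem_iff.mp hxL)
    have hxR' := (PySem.Set.mem_diff _ _ _).mp (hpermR.mem_iff.mp hxR)
    exact hxL'.2 ((PySem.Set.mem_inter _ _ _).mpr ⟨hxL'.1, hxR'.1⟩)
  have hmain := fold_eq_uncov
    ((PySem.List.sorted (PySem.Set.diff (PySem.Set.ofList lost) (PySem.Set.inter (PySem.Set.ofList lost) (PySem.Set.ofList reserve))) (fun x => x)).length
      + (PySem.List.sorted (PySem.Set.diff (PySem.Set.ofList reserve) (PySem.Set.inter (PySem.Set.ofList lost) (PySem.Set.ofList reserve))) (fun x => x)).length)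
    _ _ (le_refl _)
    (pairwise_lt_sorted _ hlostU) (pairwise_lt_sorted _ hresU) hdisj
  have hlen : PySem.Set.len ((PySem.List.sorted (PySem.Set.diff (PySem.Set.ofList reserve) (PySem.Set.inter (PySem.Set.ofList lost) (PySem.Set.ofList reserve))) (fun x => x)).foldl pyStepA (PySem.Set.diff (PySem.Set.ofList lost) (PySem.Set.inter (PySem.Set.ofList lost) (PySem.Set.ofList reserve))))
      = (((PySem.List.sorted (PySem.Set.diff (PySem.Set.ofList reserve) (PySem.Set.inter (PySem.Set.ofList lost) (PySem.Set.ofList reserve))) (fun x => x)).foldl pyStepA (PySem.List.sorted (PySem.Set.diff (PySem.Set.ofList lost) (PySem.Set.inter (PySem.Set.ofList lost) (PySem.Set.ofList reserve))) (fun x => x))).length : Int) := by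
    unfold PySem.Set.len
    rw [hfold.symm.length_eq]
  rw [hlen, hmain]

-- ===== VERDICT (by name: the statement is the Claim_ definition above) =====
theorem solution_spec : Claim_equal_solution := by
  unfold Claim_equal_solution
  intro n lost reserve _
  unfold Spec_solution solution solution_alt
  dsimp only
  rw [bridge]
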